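-- pv_equiv track=rewrite | github.com/ali-hussain/project-euler | problem1.py | find_multiples
-- ===== SOURCE A (Python) =====
-- def find_multiples(factors, start, end):
--     multiples = []
--     for number in range(start, end+1):
--         for factor in factors:
--             if number % factor == 0:
--                 multiples.append(number)
--                 break
--     return multiples
--
-- multiples = find_multiples([3,5], 1, 999)
-- ===== SOURCE B (Python) =====
-- def find_multiples(factors, start, end):
--     hits = set()
--     for f in factors:
--         d = abs(f)
--         first = start + (-start) % d
--         hits.update(range(first, end + 1, d))
--     return sorted(hits)
-- ===== Notes on version B (the rewrite author's own statement) =====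
-- stated objective: alternative
-- what changed: Instead of testing every number in [start, end] against every factor, B steps directly through each factor's multiples with range(first, end+1, abs(f)), unions them into a set and sorts.
-- outside the precondition, e.g. on find_multiples([0], 5, 1): A returns [], B raises ZeroDivisionError; on find_multiples([2, 0], 2, 2): A returns [2], B raises ZeroDivisionError
import Mathlib
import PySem

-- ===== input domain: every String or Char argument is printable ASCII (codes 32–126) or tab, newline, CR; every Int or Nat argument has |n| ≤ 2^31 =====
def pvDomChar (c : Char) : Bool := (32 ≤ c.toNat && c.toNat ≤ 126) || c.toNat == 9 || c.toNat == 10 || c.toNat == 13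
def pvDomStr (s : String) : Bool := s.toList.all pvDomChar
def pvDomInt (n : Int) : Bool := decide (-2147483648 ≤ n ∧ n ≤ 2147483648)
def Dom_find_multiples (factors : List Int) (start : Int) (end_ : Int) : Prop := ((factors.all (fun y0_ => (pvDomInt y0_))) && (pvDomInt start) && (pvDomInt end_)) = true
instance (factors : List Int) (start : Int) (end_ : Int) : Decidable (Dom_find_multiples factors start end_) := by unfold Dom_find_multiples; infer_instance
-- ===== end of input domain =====

-- B replaces the per-number scan over factors by stepping through each factor's
-- multiples directly, collecting them in a set and sorting (objective: alternative algorithm).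

-- ===== PORT A =====
-- inner 'for factor in factors: if number % factor == 0: append; break'
def findA_inner (factors : List Int) (number : Int) (multiples : List Int) : List Int :=
  match factors with
  | [] => multiples
  | factor :: rest =>
    if PySem.Int.mod number factor == 0 then multiples ++ [number]
    else findA_inner rest number multiples

def find_multiples (factors : List Int) (start : Int) (end_ : Int) : List Int :=
  (PySem.List.pyRange start (end_ + 1) 1).foldl
    (fun multiples number => findA_inner factors number multiples) []

-- ===== PORT B =====
def find_multiples_alt (factors : List Int) (start : Int) (end_ : Int) : List Int :=
  let hits : PySem.Set Int :=
    factors.foldl (fun hits f =>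
      let d := |f|
      let first := start + PySem.Int.mod (-start) d
      PySem.Set.update hits (PySem.List.pyRange first (end_ + 1) d)) PySem.Set.empty
  PySem.List.sorted hits (fun x => x)

-- ===== PRECONDITION & SPEC =====
-- Pre_ excludes factor lists containing 0: there Python A raises ZeroDivisionError on 'number % 0'
-- (except on accidental corners where the range is empty or an earlier factor always breaks first,
-- where A returns a list), while B's 'range(first, end+1, 0)' always raises.
def Pre_find_multiples (factors : List Int) (start : Int) (end_ : Int) : Prop :=
  factors.all (fun f => !(f == 0)) = true
instance (factors : List Int) (start : Int) (end_ : Int) : Decidable (Pre_find_multiples factors start end_) := by unfold Pre_find_multiples; infer_instance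

def pvWitness_find_multiples : List Int × Int × Int := ([3, 5], 1, 20)

def Spec_find_multiples (factors : List Int) (start : Int) (end_ : Int) (out : List Int) : Prop := out = find_multiples_alt factors start end_
instance (factors : List Int) (start : Int) (end_ : Int) (out : List Int) : Decidable (Spec_find_multiples factors start end_ out) := by unfold Spec_find_multiples; infer_instance

-- ===== CLAIM (what is proved, stated in full; the proofs are below) =====
def Claim_equal_find_multiples : Prop := ∀ (factors : List Int) (start : Int) (end_ : Int), Dom_find_multiples factors start end_ → Pre_find_multiples factors start end_ → Spec_find_multiples factors start end_ (find_multiples factors start end_)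

-- ===== LEMMAS AND PROOFS =====

-- the divisibility test A performs on each number
def hitP (factors : List Int) (number : Int) : Bool :=
  factors.any (fun f => PySem.Int.mod number f == 0)

lemma findA_inner_eq (factors : List Int) (n : Int) (m : List Int) :
    findA_inner factors n m = if hitP factors n then m ++ [n] else m := by
  induction factors with
  | nil => simp [findA_inner, hitP]
  | cons f rest ih =>
    by_cases h : PySem.Int.mod n f == 0 <;>
      simp [findA_inner, hitP, h, ih, List.any_cons]

lemma A_eq_filter (factors : List Int) (start end_ : Int) :
    find_multiples factors start end_
      = (PySem.List.pyRange start (end_ + 1) 1).filter (hitP factors) := by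
  unfold find_multiples
  rw [PySem.List.foldl_congr_mem (PySem.List.pyRange start (end_ + 1) 1)
        (fun multiples number => findA_inner factors number multiples)
        (fun m n => if hitP factors n then m ++ [n] else m) []
        (fun acc x _ => findA_inner_eq factors x acc)]
  simpa using PySem.List.foldl_append_if_eq_filter (hitP factors)
      (PySem.List.pyRange start (end_ + 1) 1) []

-- the multiples of |f| in [start, end_] are exactly the stepped range B generates
lemma mem_stepped_range (f start end_ x : Int) (hf : f ≠ 0) :
    x ∈ PySem.List.pyRange (start + PySem.Int.mod (-start) |f|) (end_ + 1) |f|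
      ↔ start ≤ x ∧ x < end_ + 1 ∧ f ∣ x := by
  have hd : (0 : Int) < |f| := abs_pos.mpr hf
  set d := |f| with hdd
  rw [PySem.List.mem_pyRange_iff_of_pos hd]
  rw [PySem.Int.mod_eq_emod_of_pos hd]
  have hmodlo : 0 ≤ (-start) % d := Int.emod_nonneg _ (by omega)
  have hmodhi : (-start) % d < d := Int.emod_lt_of_pos _ hd
  have hfirst : d ∣ start + (-start) % d := by
    have := Int.emod_add_ediv (-start) d
    exact ⟨-((-start) / d), by linarith⟩
  have hfd : f ∣ x ↔ d ∣ x := (abs_dvd f x).symm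
  constructor
  · rintro ⟨h1, h2, h3⟩
    refine ⟨by omega, h2, hfd.mpr ?_⟩
    have := dvd_add h3 hfirst
    simpa using this
  · rintro ⟨h1, h2, h3⟩
    have hdx : d ∣ x := hfd.mp h3
    refine ⟨?_, h2, dvd_sub hdx hfirst⟩
    by_contra hlt
    push_neg at hlt
    have hdiff : d ∣ start + (-start) % d - x := dvd_sub hfirst hdx
    have hpos : 0 < start + (-start) % d - x := by omega
    have := Int.le_of_dvd hpos hdiff
    omega

-- membership in the set B accumulates
lemma mem_hits (factors : List Int) (start end_ x : Int) (s : PySem.Set Int) :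
    x ∈ factors.foldl (fun hits f =>
        PySem.Set.update hits
          (PySem.List.pyRange (start + PySem.Int.mod (-start) |f|) (end_ + 1) |f|)) s
      ↔ x ∈ s ∨ ∃ f ∈ factors,
          x ∈ PySem.List.pyRange (start + PySem.Int.mod (-start) |f|) (end_ + 1) |f| := by
  induction factors generalizing s with
  | nil => simp
  | cons f rest ih =>
    simp only [List.foldl_cons, ih, PySem.Set.mem_update, List.mem_cons]
    constructor
    · rintro (⟨h | h⟩ | ⟨g, hg, hx⟩)
      · exact Or.inl h
      · exact Or.inr ⟨f, Or.inl rfl, h⟩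
      · exact Or.inr ⟨g, Or.inr hg, hx⟩
    · rintro (h | ⟨g, (rfl | hg), hx⟩)
      · exact Or.inl (Or.inl h)
      · exact Or.inl (Or.inr hx)
      · exact Or.inr ⟨g, hg, hx⟩

lemma nodup_hits (factors : List Int) (start end_ : Int) (s : PySem.Set Int)
    (hs : s.Nodup) :
    (factors.foldl (fun hits f =>
        PySem.Set.update hits
          (PySem.List.pyRange (start + PySem.Int.mod (-start) |f|) (end_ + 1) |f|)) s).Nodup := by
  induction factors generalizing s with
  | nil => exact hs
  | cons f rest ih => exact ih _ (PySem.Set.nodup_update _ _ hs)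

lemma hitP_iff (factors : List Int) (n : Int) :
    hitP factors n = true ↔ ∃ f ∈ factors, f ∣ n := by
  simp only [hitP, List.any_eq_true, beq_iff_eq]
  constructor
  · rintro ⟨f, hf, h⟩
    exact ⟨f, hf, (PySem.Int.mod_eq_zero_iff_dvd n f).mp h⟩
  · rintro ⟨f, hf, h⟩
    exact ⟨f, hf, (PySem.Int.mod_eq_zero_iff_dvd n f).mpr h⟩

-- ===== VERDICT (by name: the statement is the Claim_ definition above) =====
theorem find_multiples_spec : Claim_equal_find_multiples := by
  intro factors start end_ _ hpre'
  have hpre : (0 : Int) ∉ factors := by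
    intro h0
    have := List.all_eq_true.mp hpre' 0 h0
    simp at this
  unfold Spec_find_multiples
  rw [A_eq_filter]
  unfold find_multiples_alt
  set C := (PySem.List.pyRange start (end_ + 1) 1).filter (hitP factors) with hC
  set S := factors.foldl (fun hits f =>
      PySem.Set.update hits
        (PySem.List.pyRange (start + PySem.Int.mod (-start) |f|) (end_ + 1) |f|))
      PySem.Set.empty with hS
  have hnodC : C.Nodup := (PySem.List.nodup_pyRange_one start (end_ + 1)).filter _
  have hnodS : S.Nodup := nodup_hits factors start end_ _ List.nodup_nil
  have hmem : ∀ x, x ∈ C ↔ x ∈ S := by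
    intro x
    rw [hC, hS, List.mem_filter, mem_hits, PySem.List.mem_pyRange_one]
    simp only [PySem.Set.empty, List.not_mem_nil, false_or, hitP_iff]
    constructor
    · rintro ⟨⟨h1, h2⟩, f, hf, hdvd⟩
      refine ⟨f, hf, ?_⟩
      exact (mem_stepped_range f start end_ x (fun h0 => hpre (h0 ▸ hf))).mpr ⟨h1, h2, hdvd⟩
    · rintro ⟨f, hf, hx⟩
      obtain ⟨h1, h2, h3⟩ :=
        (mem_stepped_range f start end_ x (fun h0 => hpre (h0 ▸ hf))).mp hx
      exact ⟨⟨h1, h2⟩, f, hf, h3⟩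
  have hperm : C.Perm S := (List.perm_ext_iff_of_nodup hnodC hnodS).mpr hmem
  have hpair : C.Pairwise (fun a b => a < b) := by
    exact (PySem.List.pairwise_lt_pyRange_one start (end_ + 1)).filter _
  exact (PySem.List.sorted_eq_of_perm_of_pairwise_lt S C (fun x => x) hperm hpair).symm
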